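-- pv_equiv track=rewrite | github.com/Cyber-Syntax/linux-system-utils | src/migration/md_to_org.py | remove_kanban_blocks
-- ===== SOURCE A (Python) =====
-- def remove_kanban_blocks(lines: list[str]) -> list[str]:
--     """Drop Obsidian ``%% kanban: ... %%`` settings blocks."""
--     out: list[str] = []
--     in_block = False
--     for line in lines:
--         stripped = line.strip()
--         if not in_block and stripped.startswith("%% kanban:"):
--             in_block = True
--             continue
--         if in_block and stripped == "%%":
--             in_block = False
--             continue
--         if not in_block:
--             out.append(line)
--     return out
-- ===== SOURCE B (Python) =====
-- def _after_close(seg: list[str]) -> list[str]: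
--     """Suffix of seg after its first '%%' close line; [] if the block never closes."""
--     for j, l in enumerate(seg):
--         if l.strip() == "%%":
--             return seg[j + 1:]
--     return []
--
--
-- def remove_kanban_blocks(lines: list[str]) -> list[str]:
--     """Drop Obsidian ``%% kanban: ... %%`` settings blocks.
--
--     Staged passes: first SPLIT the lines on '%% kanban:' start markers
--     (markers dropped), then keep the first segment whole and, for every
--     later segment, keep only what follows its first '%%' close line.
--     """
--     segments: list[list[str]] = [[]]
--     for line in lines:
--         if line.strip().startswith("%% kanban:"):
--             segments.append([])
--         else:
--             segments[-1].append(line)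
--     return segments[0] + [x for seg in segments[1:] for x in _after_close(seg)]
-- ===== Notes on version B (the rewrite author's own statement) =====
-- stated objective: alternative
-- what changed: Replaces A's single pass with an in_block flag by two staged passes: split the lines on '%% kanban:' start markers, then keep the first segment whole and only the post-'%%' suffix of each later segment.
import Mathlib
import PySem

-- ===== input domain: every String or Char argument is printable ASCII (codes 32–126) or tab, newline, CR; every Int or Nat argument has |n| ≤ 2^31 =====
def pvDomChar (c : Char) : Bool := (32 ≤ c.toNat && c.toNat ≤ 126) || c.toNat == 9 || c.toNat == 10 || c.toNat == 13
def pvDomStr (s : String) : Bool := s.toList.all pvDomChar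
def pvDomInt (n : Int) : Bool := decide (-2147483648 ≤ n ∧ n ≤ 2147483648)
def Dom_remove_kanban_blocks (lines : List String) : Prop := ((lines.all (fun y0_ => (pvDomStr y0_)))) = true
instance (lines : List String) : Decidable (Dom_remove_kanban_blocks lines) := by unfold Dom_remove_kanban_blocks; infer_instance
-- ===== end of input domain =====

-- B replaces A's single flagged pass by two staged passes: split the lines on
-- '%% kanban:' start markers, then keep the first segment and the post-'%%'
-- suffix of each later segment (alternative decomposition, same cost).


-- ===== PORT A =====
-- A walks the lines with a boolean in_block flag; the for loop becomes structural
-- recursion over the remaining lines with the same flag as state, branches in order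
-- (the local 'stripped' is inlined into the three tests).
def rkbGoA (ls : List String) (inb : Bool) : List String :=
  match ls with
  | [] => []
  | l :: rest =>
    if !inb && PySem.Str.startswith (PySem.Str.strip l) "%% kanban:" then
      rkbGoA rest true
    else if inb && (PySem.Str.strip l == "%%") then
      rkbGoA rest false
    else if !inb then
      l :: rkbGoA rest inb
    else
      rkbGoA rest inb

def remove_kanban_blocks (lines : List String) : List String :=
  rkbGoA lines false

-- ===== PORT B =====
-- B stage 1: split the lines on '%% kanban:' start markers (markers dropped);
-- the Python loop that appends to the last segment becomes the left-to-right
-- structural recursion building the same segmentation.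
def rkbSplit (ls : List String) : List (List String) :=
  match ls with
  | [] => [[]]
  | l :: rest =>
    if PySem.Str.startswith (PySem.Str.strip l) "%% kanban:" then
      [] :: rkbSplit rest
    else
      match rkbSplit rest with
      | [] => [[l]]          -- unreachable: rkbSplit never returns []
      | s :: ss => (l :: s) :: ss

-- B's helper _after_close: suffix after the first '%%' line, [] if none.
def rkbAfterClose (seg : List String) : List String :=
  match seg with
  | [] => []
  | l :: rest =>
    if PySem.Str.strip l == "%%" then rest
    else rkbAfterClose rest

-- B stage 2: first segment kept whole, later segments trimmed through their close.
def remove_kanban_blocks_alt (lines : List String) : List String :=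
  match rkbSplit lines with
  | [] => []                 -- unreachable: rkbSplit never returns []
  | s :: ss => s ++ ss.flatMap rkbAfterClose

-- ===== PRECONDITION & SPEC =====
def Spec_remove_kanban_blocks (lines : List String) (out : List String) : Prop := out = remove_kanban_blocks_alt lines
instance (lines : List String) (out : List String) : Decidable (Spec_remove_kanban_blocks lines out) := by unfold Spec_remove_kanban_blocks; infer_instance

-- ===== CLAIM (what is proved, stated in full; the proofs are below) =====
def Claim_equal_remove_kanban_blocks : Prop := ∀ (lines : List String), Dom_remove_kanban_blocks lines → Spec_remove_kanban_blocks lines (remove_kanban_blocks lines)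

-- ===== LEMMAS AND PROOFS =====

-- Plain equation lemmas for the cons cases (so `rw` can expose the conditions).
theorem goA_cons (l : String) (rest : List String) (inb : Bool) :
    rkbGoA (l :: rest) inb =
      if !inb && PySem.Str.startswith (PySem.Str.strip l) "%% kanban:" then
        rkbGoA rest true
      else if inb && (PySem.Str.strip l == "%%") then
        rkbGoA rest false
      else if !inb then
        l :: rkbGoA rest inb
      else
        rkbGoA rest inb := by
  rw [rkbGoA]

theorem split_cons (l : String) (rest : List String) :
    rkbSplit (l :: rest) =
      if PySem.Str.startswith (PySem.Str.strip l) "%% kanban:" then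
        [] :: rkbSplit rest
      else
        match rkbSplit rest with
        | [] => [[l]]
        | s :: ss => (l :: s) :: ss := by
  rw [rkbSplit]

theorem afterClose_cons (l : String) (rest : List String) :
    rkbAfterClose (l :: rest) =
      if PySem.Str.strip l == "%%" then rest else rkbAfterClose rest := by
  rw [rkbAfterClose]

theorem split_ne_nil (ls : List String) : rkbSplit ls ≠ [] := by
  induction ls with
  | nil => simp [rkbSplit]
  | cons l rest ih =>
    cases h : rkbSplit rest with
    | nil => exact absurd h ih
    | cons s ss =>
      rw [split_cons, h]
      split <;> simp

-- A line starting a block ('%% kanban:' prefix) can never strip to exactly '%%'.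
theorem start_not_close (s : String)
    (h : PySem.Str.startswith s "%% kanban:" = true) : (s == "%%") = false := by
  by_contra hc
  have : s = "%%" := by
    cases hEq : (s == "%%") with
    | false => simp [hEq] at hc
    | true => exact of_decide_eq_true (by simpa using hEq)
  subst this
  simp [pysem] at h

-- Core invariant relating A's flagged pass to B's segmentation:
-- out of a block, A yields the head segment plus the trimmed later segments;
-- inside a block, A trims every segment (including the head) through its close.
theorem goA_split (ls : List String) :
    (∀ s ss, rkbSplit ls = s :: ss → rkbGoA ls false = s ++ ss.flatMap rkbAfterClose) ∧
    rkbGoA ls true = (rkbSplit ls).flatMap rkbAfterClose := by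
  induction ls with
  | nil =>
    constructor
    · intro s ss h
      simp [rkbSplit] at h
      simp [h.1, h.2, rkbGoA]
    · simp [rkbGoA, rkbSplit, rkbAfterClose]
  | cons l rest ih =>
    cases hS : PySem.Str.startswith (PySem.Str.strip l) "%% kanban:" with
    | true =>
      have hC := start_not_close _ hS
      constructor
      · intro s ss h
        rw [split_cons, if_pos hS] at h
        cases h
        rw [goA_cons, hS]
        simp [ih.2]
      · rw [goA_cons, hS, hC, split_cons, if_pos hS]
        simp [ih.2, rkbAfterClose]
    | false =>
      obtain ⟨s, ss, hsplit⟩ := List.exists_cons_of_ne_nil (split_ne_nil rest)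
      constructor
      · intro t ts h
        rw [split_cons, if_neg (by rw [hS]; simp), hsplit] at h
        cases h
        rw [goA_cons, hS]
        simp [ih.1 s ss hsplit]
      · rw [goA_cons, hS, split_cons, hsplit]
        simp only [Bool.not_true, Bool.false_and, Bool.true_and, hS,
          if_neg Bool.false_ne_true]
        cases hC : PySem.Str.strip l == "%%" with
        | true =>
          rw [if_pos rfl, List.flatMap_cons, afterClose_cons, if_pos hC]
          exact ih.1 s ss hsplit
        | false =>
          rw [if_neg Bool.false_ne_true, List.flatMap_cons, afterClose_cons,
            if_neg (by rw [hC]; simp)]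
          have h2 := ih.2
          rw [hsplit] at h2
          simpa using h2

-- ===== VERDICT (by name: the statement is the Claim_ definition above) =====
theorem remove_kanban_blocks_spec : Claim_equal_remove_kanban_blocks := by
  intro lines _
  unfold Spec_remove_kanban_blocks remove_kanban_blocks remove_kanban_blocks_alt
  obtain ⟨s, ss, h⟩ := List.exists_cons_of_ne_nil (split_ne_nil lines)
  rw [h]
  exact (goA_split lines).1 s ss h
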